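-- pv_equiv track=rewrite | github.com/indrawx/pyprojects | spam_detector.py | detect_spam
-- ===== SOURCE A (Python) =====
-- SPAM_KEYWORDS = [
--     ('buy', 10), ('free', 5), ('call', 12), ('text', 4), ('now', 7), ('win', 19), ('winner', 19), ('claim', 13)
-- ]
--
-- def detect_spam(words, score_limit=15):
--     spam_skore = 0
--     for word in words:
--         for i in SPAM_KEYWORDS:
--             if word == i[0]:
--                 spam_skore += i[1]
--
--     if spam_skore >= score_limit:
--         return True, spam_skore
--     else:
--         return False, spam_skore
-- ===== SOURCE B (Python) =====
-- SPAM_KEYWORDS = [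
--     ('buy', 10), ('free', 5), ('call', 12), ('text', 4), ('now', 7), ('win', 19), ('winner', 19), ('claim', 13)
-- ]
--
-- def detect_spam(words, score_limit=15):
--     counts = {}
--     for w in words:
--         counts[w] = counts.get(w, 0) + 1
--     spam_skore = sum(s * counts.get(kw, 0) for kw, s in SPAM_KEYWORDS)
--     return spam_skore >= score_limit, spam_skore
-- ===== Notes on version B (the rewrite author's own statement) =====
-- stated objective: alternative
-- what changed: B counts word frequencies in one dict pass and then sums score*count over the fixed 8-keyword list, instead of A's nested scan of all keywords for every word.
import Mathlib
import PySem

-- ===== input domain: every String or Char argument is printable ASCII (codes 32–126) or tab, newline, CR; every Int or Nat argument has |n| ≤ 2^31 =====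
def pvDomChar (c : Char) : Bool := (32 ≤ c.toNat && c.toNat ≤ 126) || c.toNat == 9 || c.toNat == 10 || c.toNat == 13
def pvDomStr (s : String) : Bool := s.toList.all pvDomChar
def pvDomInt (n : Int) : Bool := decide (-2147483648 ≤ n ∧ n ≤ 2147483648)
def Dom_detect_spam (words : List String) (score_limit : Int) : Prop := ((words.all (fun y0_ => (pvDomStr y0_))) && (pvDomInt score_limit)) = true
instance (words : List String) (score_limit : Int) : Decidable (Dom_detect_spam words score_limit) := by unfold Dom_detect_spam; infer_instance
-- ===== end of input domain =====

-- B counts word frequencies in one dict pass and then sums score*count over the fixed keyword list, instead of A's nested scan of all keywords per word (alternative decomposition).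

-- ===== PORT A =====
def SPAM_KEYWORDS : List (String × Int) :=
  [("buy", 10), ("free", 5), ("call", 12), ("text", 4), ("now", 7), ("win", 19), ("winner", 19), ("claim", 13)]

def detect_spam (words : List String) (score_limit : Int) : Bool × Int :=
  let spam_skore : Int := words.foldl
    (fun acc word => SPAM_KEYWORDS.foldl (fun a i => if word == i.1 then a + i.2 else a) acc) 0
  if spam_skore ≥ score_limit then (true, spam_skore) else (false, spam_skore)

-- ===== PORT B =====
def detect_spam_alt (words : List String) (score_limit : Int) : Bool × Int :=
  let counts : PySem.Dict String Int :=
    words.foldl (fun d w => d.insert w (d.getD w 0 + 1)) PySem.Dict.empty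
  let spam_skore : Int := SPAM_KEYWORDS.foldl (fun a kv => a + kv.2 * counts.getD kv.1 0) 0
  (decide (spam_skore ≥ score_limit), spam_skore)

-- ===== PRECONDITION & SPEC =====
def Spec_detect_spam (words : List String) (score_limit : Int) (out : Bool × Int) : Prop := out = detect_spam_alt words score_limit
instance (words : List String) (score_limit : Int) (out : Bool × Int) : Decidable (Spec_detect_spam words score_limit out) := by unfold Spec_detect_spam; infer_instance

-- ===== CLAIM (what is proved, stated in full; the proofs are below) =====
def Claim_equal_detect_spam : Prop := ∀ (words : List String) (score_limit : Int), Dom_detect_spam words score_limit → Spec_detect_spam words score_limit (detect_spam words score_limit)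

-- ===== LEMMAS AND PROOFS =====

-- the per-word spam contribution of A's inner keyword scan
def kwScore (w : String) : Int :=
  (if w = "buy" then 10 else 0) + (if w = "free" then 5 else 0) + (if w = "call" then 12 else 0) +
  (if w = "text" then 4 else 0) + (if w = "now" then 7 else 0) + (if w = "win" then 19 else 0) +
  (if w = "winner" then 19 else 0) + (if w = "claim" then 13 else 0)

-- the total spam score as a function of word counts (B's view)
def totScore (ws : List String) : Int :=
  10 * (ws.count "buy" : Int) + 5 * (ws.count "free" : Int) + 12 * (ws.count "call" : Int) +
  4 * (ws.count "text" : Int) + 7 * (ws.count "now" : Int) + 19 * (ws.count "win" : Int) +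
  19 * (ws.count "winner" : Int) + 13 * (ws.count "claim" : Int)

theorem ite_add_shift (c : Prop) [Decidable c] (a s : Int) :
    (if c then a + s else a) = a + (if c then s else 0) := by
  split <;> simp

theorem innerA (w : String) (acc : Int) :
    SPAM_KEYWORDS.foldl (fun a i => if w == i.1 then a + i.2 else a) acc = acc + kwScore w := by
  simp only [SPAM_KEYWORDS, kwScore, List.foldl, beq_iff_eq, ite_add_shift]
  ring

theorem totScore_cons (w : String) (ws : List String) :
    totScore (w :: ws) = totScore ws + kwScore w := by
  simp only [totScore, kwScore, List.count_cons, beq_iff_eq]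
  push_cast
  simp only [mul_add, mul_ite, mul_one, mul_zero, eq_comm (a := w)]
  ring

theorem scoreA (ws : List String) (acc : Int) :
    ws.foldl (fun acc word => SPAM_KEYWORDS.foldl (fun a i => if word == i.1 then a + i.2 else a) acc) acc
      = acc + totScore ws := by
  induction ws generalizing acc with
  | nil => simp [totScore]
  | cons w ws ih =>
    rw [List.foldl_cons, innerA, ih, totScore_cons]
    ring

theorem scoreB (ws : List String) :
    SPAM_KEYWORDS.foldl
        (fun a kv => a + kv.2 * (ws.foldl (fun d w => d.insert w (d.getD w 0 + 1)) PySem.Dict.empty).getD kv.1 0) 0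
      = totScore ws := by
  simp only [SPAM_KEYWORDS, List.foldl, PySem.Dict.getD_foldl_insert_add_one, totScore]
  simp [PySem.Dict.getD]

-- ===== VERDICT (by name: the statement is the Claim_ definition above) =====
theorem detect_spam_spec : Claim_equal_detect_spam := by
  intro words score_limit _
  unfold Spec_detect_spam detect_spam detect_spam_alt
  simp only [scoreA, scoreB, zero_add]
  split_ifs with h <;> simp [h]
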